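-- pv_equiv track=rewrite | github.com/LucasLeculier/L3-1 | AtelierL3/Atelier1/EXERCICE 4/main.py | date_est_valide
-- ===== SOURCE A (Python) =====
-- ANNEE_MIN = 1900
--
-- ANNEE_MAX = 2022
--
-- def est_bissextile(a: int) -> bool:
--     """Cette fonction prend en paramètre un entier correspondant à une année (ex. 2000) et renvoie True si elle est
--     bissextile sinon false
--
--     """
--
--     return a % 4 == 0 and a % 100 != 0 or a % 400 == 0
--
-- def date_est_valide(j: int, m: int, a: int) -> bool:
--
--     jours_en_fevrier = 28
--
--     if est_bissextile(a):
--         jours_en_fevrier = 29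
--
--     # Contient des listes représentant chaque en tant que des couples [a, b] ou a est le numéro du mois et b le nombre maximum de jours de ce mois dans l'année
--     max_jours_mois = [ [1, 31], [2, jours_en_fevrier], [3, 31], [4, 30], [5, 31], [6, 30], [7, 31], [8, 31], [9, 30], [10, 31], [11, 30], [12, 31] ]
--
--     if ANNEE_MIN <= a <= ANNEE_MAX:
--         # On parcours le tableau des mois et de leur maximum de jours
--         for e in max_jours_mois:
--
--             # On cherche le mois qui correspond au mois rentré
--             if m == e[0]:
--
--                 # On return True si le jour existe de 1 au maximum de jours du mois sinon False
--                 return 0 < j <= e[1]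
--
--     # Si le nombre rentré pour mois = m n'est compté parmis les 12 mois existants alors la date est erronée
--     return False
-- ===== SOURCE B (Python) =====
-- def est_bissextile(a: int) -> bool:
--     return a % 4 == 0 and a % 100 != 0 or a % 400 == 0
--
-- def date_est_valide(j: int, m: int, a: int) -> bool:
--     # Reject everything outside the valid envelope up front, then compute the
--     # month length by the closed parity formula 30 + (m + m//8) % 2 (February
--     # handled arithmetically via the leap test) instead of any table lookup.
--     if a < 1900 or a > 2022 or m < 1 or m > 12 or j < 1:
--         return False
--     if m == 2:
--         return j <= 28 + est_bissextile(a)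
--     return j <= 30 + (m + m // 8) % 2
-- ===== Notes on version B (the rewrite author's own statement) =====
-- stated objective: alternative
-- what changed: Replaces the per-month [month, maxdays] table and its linear scan with a single up-front range rejection followed by the closed arithmetic month-length formula 30 + (m + m//8) % 2 (February computed as 28 + leap flag), so no table or per-month branch exists at all.
import Mathlib
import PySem

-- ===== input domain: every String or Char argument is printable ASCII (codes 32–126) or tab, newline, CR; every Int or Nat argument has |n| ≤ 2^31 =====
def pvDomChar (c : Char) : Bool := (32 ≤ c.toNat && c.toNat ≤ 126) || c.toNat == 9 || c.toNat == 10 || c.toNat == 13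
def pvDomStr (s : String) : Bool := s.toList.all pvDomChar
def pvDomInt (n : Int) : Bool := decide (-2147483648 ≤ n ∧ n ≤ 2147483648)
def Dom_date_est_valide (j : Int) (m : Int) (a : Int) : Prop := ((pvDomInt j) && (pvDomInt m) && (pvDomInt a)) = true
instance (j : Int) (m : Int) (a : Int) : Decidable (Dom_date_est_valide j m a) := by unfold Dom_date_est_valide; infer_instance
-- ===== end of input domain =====

-- B drops A's per-month table and linear scan entirely: one up-front range rejection,
-- then the closed arithmetic formula 30 + (m + m//8) % 2 for the month length
-- (February as 28 + leap flag) (objective: alternative).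

-- ===== PORT A =====
def est_bissextile (a : Int) : Bool :=
  (PySem.Int.mod a 4 == 0 && PySem.Int.mod a 100 != 0) || PySem.Int.mod a 400 == 0

-- the 'for e in max_jours_mois' loop: first pair whose month equals m decides; falling
-- off the end reaches the trailing 'return False'
def dateLoopA (j : Int) (m : Int) : List (Int × Int) → Bool
  | [] => false
  | e :: rest => if m == e.1 then decide (0 < j ∧ j ≤ e.2) else dateLoopA j m rest

def date_est_valide (j : Int) (m : Int) (a : Int) : Bool :=
  let jours_en_fevrier : Int := if est_bissextile a then 29 else 28
  let max_jours_mois : List (Int × Int) :=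
    [(1, 31), (2, jours_en_fevrier), (3, 31), (4, 30), (5, 31), (6, 30),
     (7, 31), (8, 31), (9, 30), (10, 31), (11, 30), (12, 31)]
  if 1900 ≤ a ∧ a ≤ 2022 then dateLoopA j m max_jours_mois else false

-- ===== PORT B =====
def date_est_valide_alt (j : Int) (m : Int) (a : Int) : Bool :=
  if a < 1900 || a > 2022 || m < 1 || m > 12 || j < 1 then false
  else if m == 2 then decide (j ≤ 28 + (if est_bissextile a then (1 : Int) else 0))
  else decide (j ≤ 30 + PySem.Int.mod (m + PySem.Int.floordiv m 8) 2)

-- ===== PRECONDITION & SPEC =====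
def Spec_date_est_valide (j : Int) (m : Int) (a : Int) (out : Bool) : Prop := out = date_est_valide_alt j m a
instance (j : Int) (m : Int) (a : Int) (out : Bool) : Decidable (Spec_date_est_valide j m a out) := by unfold Spec_date_est_valide; infer_instance

-- ===== CLAIM =====
def Claim_equal_date_est_valide : Prop := ∀ (j : Int) (m : Int) (a : Int), Dom_date_est_valide j m a → Spec_date_est_valide j m a (date_est_valide j m a)

-- ===== LEMMAS AND PROOFS =====

-- ===== VERDICT =====
theorem date_est_valide_spec : Claim_equal_date_est_valide := by
  intro j m a _
  simp only [Spec_date_est_valide, date_est_valide, date_est_valide_alt]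
  by_cases hy : 1900 ≤ a ∧ a ≤ 2022
  case neg =>
    have h : a < 1900 ∨ a > 2022 := by omega
    rcases h with h | h <;> simp [hy, h]
  case pos =>
    simp only [hy, if_true, if_pos]
    have ha1 : ¬ a < 1900 := by omega
    have ha2 : ¬ a > 2022 := by omega
    by_cases h1 : m = 1
    · subst h1
      by_cases hj : j < 1 <;>
        simp [dateLoopA, ha1, ha2, hj,
          show (30 + PySem.Int.mod ((1:Int) + PySem.Int.floordiv 1 8) 2) = 31 from by decide] <;>
        omega
    by_cases h2 : m = 2
    · subst h2
      by_cases hj : j < 1 <;> by_cases hb : est_bissextile a = true <;>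
        simp [dateLoopA, ha1, ha2, hj, hb] <;> omega
    by_cases h3 : m = 3
    · subst h3
      by_cases hj : j < 1 <;>
        simp [dateLoopA, ha1, ha2, hj,
          show (30 + PySem.Int.mod ((3:Int) + PySem.Int.floordiv 3 8) 2) = 31 from by decide] <;>
        omega
    by_cases h4 : m = 4
    · subst h4
      by_cases hj : j < 1 <;>
        simp [dateLoopA, ha1, ha2, hj,
          show (30 + PySem.Int.mod ((4:Int) + PySem.Int.floordiv 4 8) 2) = 30 from by decide] <;>
        omega
    by_cases h5 : m = 5
    · subst h5
      by_cases hj : j < 1 <;>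
        simp [dateLoopA, ha1, ha2, hj,
          show (30 + PySem.Int.mod ((5:Int) + PySem.Int.floordiv 5 8) 2) = 31 from by decide] <;>
        omega
    by_cases h6 : m = 6
    · subst h6
      by_cases hj : j < 1 <;>
        simp [dateLoopA, ha1, ha2, hj,
          show (30 + PySem.Int.mod ((6:Int) + PySem.Int.floordiv 6 8) 2) = 30 from by decide] <;>
        omega
    by_cases h7 : m = 7
    · subst h7
      by_cases hj : j < 1 <;>
        simp [dateLoopA, ha1, ha2, hj,
          show (30 + PySem.Int.mod ((7:Int) + PySem.Int.floordiv 7 8) 2) = 31 from by decide] <;>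
        omega
    by_cases h8 : m = 8
    · subst h8
      by_cases hj : j < 1 <;>
        simp [dateLoopA, ha1, ha2, hj,
          show (30 + PySem.Int.mod ((8:Int) + PySem.Int.floordiv 8 8) 2) = 31 from by decide] <;>
        omega
    by_cases h9 : m = 9
    · subst h9
      by_cases hj : j < 1 <;>
        simp [dateLoopA, ha1, ha2, hj,
          show (30 + PySem.Int.mod ((9:Int) + PySem.Int.floordiv 9 8) 2) = 30 from by decide] <;>
        omega
    by_cases h10 : m = 10
    · subst h10
      by_cases hj : j < 1 <;>
        simp [dateLoopA, ha1, ha2, hj,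
          show (30 + PySem.Int.mod ((10:Int) + PySem.Int.floordiv 10 8) 2) = 31 from by decide] <;>
        omega
    by_cases h11 : m = 11
    · subst h11
      by_cases hj : j < 1 <;>
        simp [dateLoopA, ha1, ha2, hj,
          show (30 + PySem.Int.mod ((11:Int) + PySem.Int.floordiv 11 8) 2) = 30 from by decide] <;>
        omega
    by_cases h12 : m = 12
    · subst h12
      by_cases hj : j < 1 <;>
        simp [dateLoopA, ha1, ha2, hj,
          show (30 + PySem.Int.mod ((12:Int) + PySem.Int.floordiv 12 8) 2) = 31 from by decide] <;>
        omega
    have hm : m < 1 ∨ m > 12 := by omega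
    rcases hm with h | h <;>
      simp [dateLoopA, h1, h2, h3, h4, h5, h6, h7, h8, h9, h10, h11, h12, ha1, ha2, h]
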